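-- pv_equiv track=rewrite | github.com/cahudson94/code-wars-practice | 5_kyu/2024/jan/endianness_conversion.py | switch_endian
-- ===== SOURCE A (Python) =====
-- def switch_endian(n, bits):
--     if n < 0 or bits % 2 or bits < 8:
--         return None
--     x = 2
--     while x < bits:
--         x *= 2
--     if x != bits:
--         return None
--     as_hex = "0" + hex(n)[2:] if len(hex(n)) % 2 else hex(n)[2:]
--     as_hex = [as_hex[i] + as_hex[i + 1] for i in range(0, len(as_hex), 2)][::-1]
--     as_hex.extend(["00" for _ in range(bits // 8 - len(as_hex))])
--     if len(as_hex) != bits // 8: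
--         return None
--     return int(''.join(as_hex), 16)
-- ===== SOURCE B (Python) =====
-- def switch_endian(n, bits):
--     if n < 0 or bits % 2 or bits < 8:
--         return None
--     if 1 << (bits.bit_length() - 1) != bits:   # power-of-two check, no loop
--         return None
--     if n >= 1 << bits:                         # n must fit in `bits` bits
--         return None
--     result = 0
--     for _ in range(bits // 8):                 # pure integer byte swap, no hex strings
--         n, byte = divmod(n, 256)
--         result = result * 256 + byte
--     return result
-- ===== Notes on version B (the rewrite author's own statement) =====
-- stated objective: simpler
-- what changed: Replaces A's doubling while-loop and hex-string chunk/reverse/pad/rejoin pipeline with pure integer arithmetic: a bit_length power-of-two test, a 1<<bits fit test, and a divmod loop that extracts and reassembles the bytes.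
import Mathlib
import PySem

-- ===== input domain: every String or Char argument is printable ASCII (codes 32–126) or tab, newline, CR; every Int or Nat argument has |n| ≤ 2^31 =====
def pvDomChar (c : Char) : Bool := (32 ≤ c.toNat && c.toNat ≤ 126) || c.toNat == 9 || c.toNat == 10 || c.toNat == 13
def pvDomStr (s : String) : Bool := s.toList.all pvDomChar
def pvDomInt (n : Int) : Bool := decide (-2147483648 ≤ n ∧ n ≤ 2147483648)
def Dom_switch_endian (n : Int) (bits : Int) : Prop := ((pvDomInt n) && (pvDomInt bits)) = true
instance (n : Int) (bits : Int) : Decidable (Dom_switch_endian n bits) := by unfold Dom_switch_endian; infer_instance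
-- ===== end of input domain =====

-- B replaces A's hex-string chunk/reverse/pad pipeline and doubling while-loop by pure integer
-- arithmetic (bit_length power-of-two test, 1<<bits fit test, divmod byte loop); objective: simpler.

-- ===== PORT A =====
-- hex digit d (0 ≤ d < 16) as the lowercase character Python's hex() prints
def pvHexDigitChar (d : Nat) : Char := if d < 10 then Char.ofNat (48 + d) else Char.ofNat (87 + d)

-- hex(n)[2:] for n ≥ 0: most-significant digit first ("0" for n = 0)
def pvHexChars (n : Nat) : List Char :=
  if _h : n < 16 then [pvHexDigitChar n]
  else pvHexChars (n / 16) ++ [pvHexDigitChar (n % 16)]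
decreasing_by exact Nat.div_lt_self (by omega) (by omega)

-- value of one (lowercase) hex digit character, as int(·, 16) reads it
def pvHexVal (c : Char) : Nat := if 97 ≤ c.toNat then c.toNat - 87 else c.toNat - 48

-- int(s, 16): exact for the strings A joins here — nonempty, all lowercase hex digits, no sign/space/prefix
def pvParseHex (cs : List Char) : Int := (cs.foldl (fun a c => 16 * a + pvHexVal c) 0 : Nat)

-- `x = 2; while x < bits: x *= 2`; the positivity argument is only a termination artifact (x is 2,4,8,…)
def pvPowLoop (x : Nat) (hx : 0 < x) (bits : Int) : Int :=
  if (x : Int) < bits then pvPowLoop (2 * x) (by omega) bits else (x : Int)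
termination_by (bits - x).toNat
decreasing_by omega

-- Python strings are modelled as List Char here (a two-character chunk as_hex[i]+as_hex[i+1] is a
-- 2-element list); ''.join is List.flatten; all indices i, i+1 are in range, pyGetD is xs[i]
def switch_endian (n : Int) (bits : Int) : Option Int :=
  if n < 0 ∨ PySem.Int.mod bits 2 ≠ 0 ∨ bits < 8 then none
  else if pvPowLoop 2 (by omega) bits ≠ bits then none
  else
    -- hex(n) = "0x" ++ pvHexChars n.toNat, so len(hex(n)) = length + 2
    let h := pvHexChars n.toNat
    let as_hex := if (h.length + 2) % 2 ≠ 0 then '0' :: h else h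
    let pairs := ((PySem.List.pyRange 0 (as_hex.length : Int) 2).map
        (fun i => [PySem.List.pyGetD as_hex i ' ', PySem.List.pyGetD as_hex (i + 1) ' '])).reverse
    let as_hex2 := pairs ++
        (PySem.List.pyRange 0 (PySem.Int.floordiv bits 8 - (pairs.length : Int)) 1).map (fun _ => ['0', '0'])
    if (as_hex2.length : Int) ≠ PySem.Int.floordiv bits 8 then none
    else some (pvParseHex as_hex2.flatten)

-- ===== PORT B =====
-- shift counts bits.bit_length()-1 and bits are the nonnegative Python values; divmod(m, 256) is
-- (floordiv m 256, mod m 256) since 256 ≠ 0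
def switch_endian_alt (n : Int) (bits : Int) : Option Int :=
  if n < 0 ∨ PySem.Int.mod bits 2 ≠ 0 ∨ bits < 8 then none
  else if (1 : Int) <<< (PySem.Int.bitLength bits - 1) ≠ bits then none
  else if (1 : Int) <<< bits.toNat ≤ n then none
  else
    some (((PySem.List.pyRange 0 (PySem.Int.floordiv bits 8) 1).foldl
      (fun (st : Int × Int) _ => (PySem.Int.floordiv st.1 256, st.2 * 256 + PySem.Int.mod st.1 256))
      (n, 0)).2)

-- ===== PRECONDITION & SPEC =====
def Spec_switch_endian (n : Int) (bits : Int) (out : Option Int) : Prop := out = switch_endian_alt n bits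
instance (n : Int) (bits : Int) (out : Option Int) : Decidable (Spec_switch_endian n bits out) := by unfold Spec_switch_endian; infer_instance

-- ===== CLAIM (what is proved, stated in full; the proofs are below) =====
def Claim_equal_switch_endian : Prop := ∀ (n : Int) (bits : Int), Dom_switch_endian n bits → Spec_switch_endian n bits (switch_endian n bits)

-- ===== LEMMAS AND PROOFS =====

-- little-endian / big-endian byte lists of N, k bytes
def pvBytesLE (N k : Nat) : List Nat :=
  match k with
  | 0 => []
  | Nat.succ k => N % 256 :: pvBytesLE (N / 256) k

def pvBytesBE (N k : Nat) : List Nat :=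
  match k with
  | 0 => []
  | Nat.succ k => pvBytesBE (N / 256) k ++ [N % 256]

-- one byte as its two hex digit characters
def pvPair (b : Nat) : List Char := [pvHexDigitChar (b / 16), pvHexDigitChar (b % 16)]

-- number of bytes A's padded hex string encodes
def pvBn (N : Nat) : Nat := ((pvHexChars N).length + 1) / 2

-- A's padded hex string
def pvPadded (N : Nat) : List Char :=
  if ((pvHexChars N).length + 2) % 2 ≠ 0 then '0' :: pvHexChars N else pvHexChars N

theorem pvPowLoop_congr {x y : Nat} (h : x = y) (hx : 0 < x) (bits : Int) :
    pvPowLoop x hx bits = pvPowLoop y (h ▸ hx) bits := by subst h; rfl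

theorem pvPowLoop_exists (x : Nat) (hx : 0 < x) (bits : Int) :
    ∃ i : Nat, pvPowLoop x hx bits = (x : Int) * 2 ^ i := by
  fun_induction pvPowLoop x hx bits
  case case1 =>
    rename_i ih
    obtain ⟨i, hi⟩ := ih
    exact ⟨i + 1, by rw [hi]; push_cast; ring⟩
  case case2 => exact ⟨0, by simp⟩

theorem pvPowLoop_pow_eq (d j : Nat) (hj : 0 < j) :
    pvPowLoop (2 ^ j) (by positivity) ((2 : Int) ^ (j + d)) = (2 : Int) ^ (j + d) := by
  induction d generalizing j with
  | zero =>
    unfold pvPowLoop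
    rw [if_neg (by push_cast; simp)]
    push_cast; ring
  | succ d ih =>
    unfold pvPowLoop
    rw [if_pos (by push_cast; exact pow_lt_pow_right₀ (by norm_num) (by omega))]
    rw [pvPowLoop_congr (show 2 * 2 ^ j = 2 ^ (j + 1) by ring)]
    have := ih (j + 1) (by omega)
    rw [show j + 1 + d = j + (d + 1) by omega] at this
    exact this

-- A's while-loop check succeeds exactly on powers of two (given bits ≥ 8)
theorem pvPowLoop_eq_iff (bits : Int) (hb : 8 ≤ bits) :
    pvPowLoop 2 (by omega) bits = bits ↔ ∃ k : Nat, bits = (2 : Int) ^ k := by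
  constructor
  · intro h
    obtain ⟨i, hi⟩ := pvPowLoop_exists 2 (by omega) bits
    exact ⟨i + 1, by rw [← h, hi]; push_cast; ring⟩
  · rintro ⟨k, rfl⟩
    have hk3 : 3 ≤ k := by
      by_contra hlt
      interval_cases k <;> norm_num at hb
    rw [pvPowLoop_congr (show 2 = 2 ^ 1 by norm_num)]
    have := pvPowLoop_pow_eq (k - 1) 1 (by omega)
    rwa [show 1 + (k - 1) = k by omega] at this

-- B's bit_length check succeeds exactly on powers of two (given bits ≥ 8)
theorem pvBitLen_eq_iff (bits : Int) (hb : 8 ≤ bits) :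
    (1 : Int) <<< (PySem.Int.bitLength bits - 1) = bits ↔ ∃ k : Nat, bits = (2 : Int) ^ k := by
  rw [Int.shiftLeft_eq, one_mul]
  constructor
  · intro h; exact ⟨_, h.symm⟩
  · rintro ⟨k, hk⟩
    have hb' : bits = ((2 ^ k : Nat) : Int) := by push_cast; exact hk
    have hlo := PySem.Int.two_pow_bitLength_le bits (by omega)
    have hhi := PySem.Int.lt_two_pow_bitLength bits
    have hna : bits.natAbs = 2 ^ k := by rw [hb']; exact Int.natAbs_natCast _
    rw [hna] at hlo hhi
    have h1 : PySem.Int.bitLength bits - 1 ≤ k :=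
      (Nat.pow_le_pow_iff_right Nat.one_lt_two).1 hlo
    have h2 : k < PySem.Int.bitLength bits :=
      (Nat.pow_lt_pow_iff_right Nat.one_lt_two).1 hhi
    have : PySem.Int.bitLength bits - 1 = k := by omega
    rw [this, hk]

theorem pvHexChars_ne_nil (N : Nat) : pvHexChars N ≠ [] := by
  unfold pvHexChars; split <;> simp

theorem pvHexChars_lt (N : Nat) : N < 16 ^ (pvHexChars N).length := by
  fun_induction pvHexChars N with
  | case1 n h => simpa using h
  | case2 n h ih =>
    simp only [List.length_append, List.length_cons, List.length_nil]
    have hp : 16 ^ ((pvHexChars (n / 16)).length + 0 + 1)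
        = 16 * 16 ^ (pvHexChars (n / 16)).length := by ring
    rw [hp]
    have := Nat.div_add_mod n 16
    have h16 : n % 16 < 16 := Nat.mod_lt _ (by omega)
    omega

theorem pvHexChars_ge (N : Nat) (h : 2 ≤ (pvHexChars N).length) :
    16 ^ ((pvHexChars N).length - 1) ≤ N := by
  fun_induction pvHexChars N with
  | case1 n hlt => simp at h
  | case2 n hge ih =>
    simp only [List.length_append, List.length_cons, List.length_nil] at h ⊢
    have hlen : 1 ≤ (pvHexChars (n / 16)).length :=
      List.length_pos_iff.2 (pvHexChars_ne_nil _)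
    rcases Nat.lt_or_ge (pvHexChars (n / 16)).length 2 with hl | hl
    · have : (pvHexChars (n / 16)).length = 1 := by omega
      rw [this]; simpa using hge
    · have hih := ih hl
      have hmul : 16 * (16 ^ ((pvHexChars (n / 16)).length - 1)) ≤ 16 * (n / 16) :=
        Nat.mul_le_mul_left _ hih
      have hdiv : 16 * (n / 16) ≤ n := by
        have := Nat.div_mul_le_self n 16; omega
      have hpow : 16 ^ ((pvHexChars (n / 16)).length + 0 + 1 - 1)
          = 16 * 16 ^ ((pvHexChars (n / 16)).length - 1) := by
        rw [show (pvHexChars (n / 16)).length + 0 + 1 - 1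
            = ((pvHexChars (n / 16)).length - 1) + 1 by omega]
        ring
      rw [hpow]
      calc 16 * 16 ^ ((pvHexChars (n / 16)).length - 1) ≤ 16 * (n / 16) := hmul
        _ ≤ n := by omega

theorem pvHexDigitChar_zero : pvHexDigitChar 0 = '0' := by decide

theorem pvHexChars_step (M : Nat) (h : ¬ M < 16) :
    pvHexChars M = pvHexChars (M / 16) ++ [pvHexDigitChar (M % 16)] := by
  conv_lhs => unfold pvHexChars
  rw [dif_neg h]

-- the padded hex string is exactly the big-endian bytes of N written as hex pairs
theorem pvPadded_eq (N : Nat) : pvPadded N = (pvBytesBE N (pvBn N)).flatMap pvPair := by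
  induction N using Nat.strong_induction_on with
  | _ N IH =>
    by_cases h256 : N < 256
    · by_cases h16 : N < 16
      · have hc : pvHexChars N = [pvHexDigitChar N] := by
          unfold pvHexChars; rw [dif_pos h16]
        have hbn : pvBn N = 1 := by unfold pvBn; rw [hc]; simp
        unfold pvPadded
        rw [hc, hbn]
        have h1 : N % 256 = N := Nat.mod_eq_of_lt (by omega)
        have h2 : N / 16 = 0 := Nat.div_eq_of_lt h16
        have h3 : N % 16 = N := Nat.mod_eq_of_lt h16
        simp [pvBytesBE, pvPair, h1, h2, h3]
        exact pvHexDigitChar_zero.symm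
      · have hc : pvHexChars N = [pvHexDigitChar (N / 16), pvHexDigitChar (N % 16)] := by
          rw [pvHexChars_step N h16]
          conv_lhs => unfold pvHexChars
          rw [dif_pos (by omega : N / 16 < 16)]
          rfl
        have hbn : pvBn N = 1 := by unfold pvBn; rw [hc]; simp
        unfold pvPadded
        rw [hc, hbn]
        have h1 : N % 256 = N := Nat.mod_eq_of_lt (by omega)
        simp [pvBytesBE, pvPair, h1]
    · -- N ≥ 256: peel two hex digits = one byte
      have hdd : N / 16 / 16 = N / 256 := by omega
      have hsplit : pvHexChars N
          = pvHexChars (N / 256) ++ [pvHexDigitChar (N / 16 % 16), pvHexDigitChar (N % 16)] := by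
        rw [pvHexChars_step N (by omega), pvHexChars_step (N / 16) (by omega), hdd,
          List.append_assoc]
        rfl
      have hlen : (pvHexChars N).length = (pvHexChars (N / 256)).length + 2 := by
        rw [hsplit]; simp
      have hbn : pvBn N = pvBn (N / 256) + 1 := by unfold pvBn; rw [hlen]; omega
      have hIH := IH (N / 256) (Nat.div_lt_self (by omega) (by omega))
      have hpair : pvPair (N % 256) = [pvHexDigitChar (N / 16 % 16), pvHexDigitChar (N % 16)] := by
        have e1 : N % 256 / 16 = N / 16 % 16 := by
          rw [show (256 : Nat) = 16 * 16 by norm_num]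
          exact Nat.mod_mul_right_div_self N 16 16
        have e2 : N % 256 % 16 = N % 16 := Nat.mod_mod_of_dvd N (by norm_num)
        unfold pvPair
        rw [e1, e2]
      have hparN : ((pvHexChars N).length + 2) % 2 = ((pvHexChars (N / 256)).length + 2) % 2 := by
        rw [hlen]; omega
      unfold pvPadded
      rw [hbn]
      simp only [pvBytesBE, List.flatMap_append, List.flatMap_cons, List.flatMap_nil,
        List.append_nil]
      rw [← hIH, hpair, hparN, hsplit]
      unfold pvPadded
      by_cases hpar : ((pvHexChars (N / 256)).length + 2) % 2 ≠ 0
      · rw [if_pos hpar, if_pos hpar]; rfl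
      · rw [if_neg hpar, if_neg hpar]

theorem pvBn_lt (N : Nat) : N < 256 ^ pvBn N := by
  have h1 := pvHexChars_lt N
  have h2 : (pvHexChars N).length ≤ 2 * pvBn N := by unfold pvBn; omega
  calc N < 16 ^ (pvHexChars N).length := h1
    _ ≤ 16 ^ (2 * pvBn N) := Nat.pow_le_pow_right (by omega) h2
    _ = 256 ^ pvBn N := by rw [pow_mul]; norm_num

theorem pvBn_ge (N m : Nat) (hm : 0 < m) (h : m < pvBn N) : 256 ^ m ≤ N := by
  have hlen : 2 * m + 1 ≤ (pvHexChars N).length := by unfold pvBn at h; omega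
  have hge := pvHexChars_ge N (by omega)
  calc (256 : Nat) ^ m = 16 ^ (2 * m) := by rw [pow_mul]; norm_num
    _ ≤ 16 ^ ((pvHexChars N).length - 1) := Nat.pow_le_pow_right (by omega) (by omega)
    _ ≤ N := hge

theorem pvBytesLE_length (N k : Nat) : (pvBytesLE N k).length = k := by
  induction k generalizing N with
  | zero => rfl
  | succ k ih => simp [pvBytesLE, ih]

theorem pvBytesBE_reverse (N k : Nat) : (pvBytesBE N k).reverse = pvBytesLE N k := by
  induction k generalizing N with
  | zero => rfl
  | succ k ih => simp [pvBytesBE, pvBytesLE, ih]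

theorem pvBytesLE_zero (k : Nat) : pvBytesLE 0 k = List.replicate k 0 := by
  induction k with
  | zero => rfl
  | succ k ih => simp [pvBytesLE, ih, List.replicate_succ]

theorem pvBytesLE_append (N k j : Nat) (h : N < 256 ^ k) :
    pvBytesLE N k ++ List.replicate j 0 = pvBytesLE N (k + j) := by
  induction k generalizing N with
  | zero =>
    have : N = 0 := by simpa using h
    subst this
    simp [pvBytesLE, pvBytesLE_zero]
  | succ k ih =>
    have hdiv : N / 256 < 256 ^ k := by
      rw [Nat.div_lt_iff_lt_mul (by omega)]
      calc N < 256 ^ (k + 1) := h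
        _ = 256 ^ k * 256 := by ring
    simp only [pvBytesLE, show k + 1 + j = (k + j) + 1 by omega, List.cons_append]
    rw [ih _ hdiv]

theorem pvBytesLE_lt (N k : Nat) : ∀ b ∈ pvBytesLE N k, b < 256 := by
  induction k generalizing N with
  | zero => simp [pvBytesLE]
  | succ k ih =>
    simp only [pvBytesLE, List.mem_cons]
    rintro b (rfl | hb)
    · exact Nat.mod_lt _ (by omega)
    · exact ih _ _ hb

theorem pvChunkAux (L : List (List Char)) (hL : ∀ p ∈ L, ∃ a b, p = [a, b]) :
    (List.range L.length).map
      (fun j => [L.flatten.getD (2 * j) ' ', L.flatten.getD (2 * j + 1) ' ']) = L := by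
  induction L with
  | nil => rfl
  | cons p rest ih =>
    obtain ⟨a, b, rfl⟩ := hL p (by simp)
    simp only [List.length_cons, List.range_succ_eq_map, List.map_cons, List.map_map,
      List.flatten_cons, List.cons_append, List.nil_append]
    congr 1
    rw [List.map_congr_left (g := fun j =>
        [rest.flatten.getD (2 * j) ' ', rest.flatten.getD (2 * j + 1) ' ']) (fun j _ => by
      simp only [Function.comp_apply, Nat.succ_eq_add_one]
      rw [show 2 * (j + 1) = (2 * j + 1) + 1 by ring, show (2 * j + 1) + 1 + 1 = (2 * j + 1 + 1) + 1 by ring]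
      simp)]
    exact ih (fun q hq => hL q (by simp [hq]))

theorem pvFlatLen (L : List (List Char)) (hL : ∀ p ∈ L, ∃ a b, p = [a, b]) :
    L.flatten.length = 2 * L.length := by
  induction L with
  | nil => rfl
  | cons p rest ih =>
    obtain ⟨a, b, rfl⟩ := hL p (by simp)
    simp only [List.flatten_cons, List.length_append, List.length_cons, List.length_nil,
      ih (fun q hq => hL q (by simp [hq]))]
    ring

-- the index-pairing comprehension rebuilds a list of 2-character chunks
theorem pvChunk (L : List (List Char)) (hL : ∀ p ∈ L, ∃ a b, p = [a, b]) :
    (PySem.List.pyRange 0 (L.flatten.length : Int) 2).map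
      (fun i => [PySem.List.pyGetD L.flatten i ' ', PySem.List.pyGetD L.flatten (i + 1) ' ']) = L := by
  rcases L with _ | ⟨p, rest⟩
  · rfl
  have hL' : ∀ q ∈ p :: rest, ∃ a b, q = [a, b] := hL
  set L := p :: rest with hLdef
  have hflat := pvFlatLen L hL'
  have hpos : 0 < L.length := by simp [hLdef]
  rw [hflat, PySem.List.pyRange_of_pos 0 ((2 * L.length : Nat) : Int) (by norm_num)]
  have ht : (if (0 : Int) < ((2 * L.length : Nat) : Int)
      then ((((2 * L.length : Nat) : Int) - 0 + 2 - 1) / 2).toNat else 0) = L.length := by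
    rw [if_pos (by push_cast; omega)]
    have : (((2 * L.length : Nat) : Int) - 0 + 2 - 1) / 2 = (L.length : Int) := by
      push_cast; omega
    rw [this, Int.toNat_natCast]
  rw [ht, List.map_map]
  rw [List.map_congr_left (g := fun j =>
      [L.flatten.getD (2 * j) ' ', L.flatten.getD (2 * j + 1) ' ']) (fun j _ => by
    simp only [Function.comp_apply]
    have h1 : (0 : Int) + 2 * (j : Int) = ((2 * j : Nat) : Int) := by push_cast; ring
    have h2 : ((2 * j : Nat) : Int) + 1 = ((2 * j + 1 : Nat) : Int) := by push_cast; ring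
    rw [h1, h2, PySem.List.pyGetD_natCast, PySem.List.pyGetD_natCast])]
  exact pvChunkAux L hL'


theorem pvHexVal_char (d : Nat) (h : d < 16) : pvHexVal (pvHexDigitChar d) = d := by
  interval_cases d <;> decide

theorem pvParse_pairs (bs : List Nat) (acc : Nat) (h : ∀ b ∈ bs, b < 256) :
    ((bs.map pvPair).flatten).foldl (fun a c => 16 * a + pvHexVal c) acc
      = bs.foldl (fun a b => 256 * a + b) acc := by
  induction bs generalizing acc with
  | nil => rfl
  | cons b bs ih =>
    have hb : b < 256 := h b (by simp)
    simp only [List.map_cons, List.flatten_cons, pvPair, List.cons_append, List.nil_append,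
      List.foldl_cons]
    rw [pvHexVal_char _ (Nat.div_lt_of_lt_mul (by omega)),
      pvHexVal_char _ (Nat.mod_lt _ (by omega))]
    rw [ih _ (fun x hx => h x (by simp [hx]))]
    congr 1
    omega

theorem pvBFold (m N r : Nat) :
    (((List.range m).foldl
      (fun (st : Int × Int) _ => (PySem.Int.floordiv st.1 256, st.2 * 256 + PySem.Int.mod st.1 256))
      ((N : Int), (r : Int))).2)
      = ((pvBytesLE N m).foldl (fun a b => 256 * a + b) r : Nat) := by
  induction m generalizing N r with
  | zero => rfl
  | succ m ih =>
    rw [List.range_succ_eq_map, List.foldl_cons, List.foldl_map]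
    have hd : PySem.Int.floordiv (N : Int) 256 = ((N / 256 : Nat) : Int) := by
      exact_mod_cast PySem.Int.floordiv_natCast N 256
    have hm : PySem.Int.mod (N : Int) 256 = ((N % 256 : Nat) : Int) := by
      exact_mod_cast PySem.Int.mod_natCast N 256
    rw [hd, hm]
    have hr : ((r : Int) * 256 + ((N % 256 : Nat) : Int)) = ((256 * r + N % 256 : Nat) : Int) := by
      push_cast; ring
    rw [hr]
    have := ih (N / 256) (256 * r + N % 256)
    simpa [pvBytesLE] using this

theorem pvRangeConst (t : Int) (c : List Char) :
    (PySem.List.pyRange 0 t 1).map (fun _ => c) = List.replicate t.toNat c := by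
  rw [PySem.List.pyRange_of_pos 0 t (by norm_num)]
  by_cases h : t ≤ 0
  · rw [if_neg (by omega), show t.toNat = 0 by omega]; rfl
  · rw [if_pos (by omega), show (t - 0 + 1 - 1) / 1 = t by omega, List.map_map]
    have hconst : ∀ (l : List Nat), List.map (fun _ => c) l = List.replicate l.length c := by
      intro l
      induction l with
      | nil => rfl
      | cons a l ih => simp [ih, List.replicate_succ]
    show List.map (fun _ => c) (List.range t.toNat) = _
    rw [hconst, List.length_range]

theorem pvPair_shape (L : List Nat) : ∀ p ∈ L.map pvPair, ∃ a b, p = [a, b] := by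
  intro p hp
  obtain ⟨x, -, rfl⟩ := List.mem_map.1 hp
  exact ⟨_, _, rfl⟩

-- the two tails agree once both validation guards have passed (b = 2^k, k ≥ 3)
theorem pvTailEq (N b k : Nat) (hb : b = 2 ^ k) (hk3 : 3 ≤ k) :
    (let h := pvHexChars N
     let as_hex := if (h.length + 2) % 2 ≠ 0 then '0' :: h else h
     let pairs := ((PySem.List.pyRange 0 (as_hex.length : Int) 2).map
         (fun i => [PySem.List.pyGetD as_hex i ' ', PySem.List.pyGetD as_hex (i + 1) ' '])).reverse
     let as_hex2 := pairs ++
         (PySem.List.pyRange 0 (PySem.Int.floordiv (b : Int) 8 - (pairs.length : Int)) 1).map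
           (fun _ => ['0', '0'])
     if (as_hex2.length : Int) ≠ PySem.Int.floordiv (b : Int) 8 then none
     else some (pvParseHex as_hex2.flatten))
    = (if (1 : Int) <<< ((b : Int)).toNat ≤ (N : Int) then none
      else some (((PySem.List.pyRange 0 (PySem.Int.floordiv (b : Int) 8) 1).foldl
        (fun (st : Int × Int) _ =>
          (PySem.Int.floordiv st.1 256, st.2 * 256 + PySem.Int.mod st.1 256)) ((N : Int), 0)).2)) := by
  show (if _ ≠ _ then none else some _) = _
  have hm8 : 8 * 2 ^ (k - 3) = b := by
    rw [hb, show k = 3 + (k - 3) by omega, pow_add]; norm_num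
  set m := 2 ^ (k - 3) with hmdef
  have hm : 0 < m := Nat.two_pow_pos _
  have hfloor : PySem.Int.floordiv (b : Int) 8 = (m : Int) := by
    have h8 : PySem.Int.floordiv ((b : Nat) : Int) 8 = ((b / 8 : Nat) : Int) := by
      exact_mod_cast PySem.Int.floordiv_natCast b 8
    rw [h8]; congr 1; omega
  have h256m : 256 ^ m = 2 ^ b := by
    rw [show (256 : Nat) = 2 ^ 8 by norm_num, ← pow_mul, ← hm8]
  rw [hfloor]
  rw [show (if ((pvHexChars N).length + 2) % 2 ≠ 0 then '0' :: pvHexChars N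
      else pvHexChars N) = pvPadded N from rfl]
  have hpad : pvPadded N = ((pvBytesBE N (pvBn N)).map pvPair).flatten := by
    rw [pvPadded_eq]; exact List.flatMap_def ..
  rw [hpad, pvChunk _ (pvPair_shape _), ← List.map_reverse, pvBytesBE_reverse]
  have hlen : ((pvBytesLE N (pvBn N)).map pvPair).length = pvBn N := by
    rw [List.length_map, pvBytesLE_length]
  rw [hlen, pvRangeConst, Int.toNat_sub,
    show (['0', '0'] : List Char) = pvPair 0 from rfl, ← List.map_replicate, ← List.map_append]
  -- B guard ↔ 256^m ≤ N
  have hguard : ((1 : Int) <<< ((b : Int)).toNat ≤ (N : Int)) ↔ 256 ^ m ≤ N := by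
    rw [Int.toNat_natCast, Int.shiftLeft_eq, one_mul,
      show ((2 : Int) ^ b) = ((2 ^ b : Nat) : Int) by push_cast; rfl, Nat.cast_le, h256m]
  by_cases hfit : pvBn N ≤ m
  · -- both return the byte-swapped value
    have hNlt : N < 256 ^ m := lt_of_lt_of_le (pvBn_lt N) (Nat.pow_le_pow_right (by omega) hfit)
    rw [show pvBytesLE N (pvBn N) ++ List.replicate (m - pvBn N) 0 = pvBytesLE N m from by
      rw [pvBytesLE_append _ _ _ (pvBn_lt N), Nat.add_sub_cancel' hfit]]
    rw [if_neg (by rw [List.length_map, pvBytesLE_length]; exact fun h => h rfl),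
      if_neg (by rw [hguard]; omega)]
    congr 1
    unfold pvParseHex
    rw [pvParse_pairs _ _ (pvBytesLE_lt N m)]
    rw [PySem.List.pyRange_zero_natCast, List.foldl_map]
    exact_mod_cast (pvBFold m N 0).symm
  · -- n does not fit in bits//8 bytes: both return none
    have hge : 256 ^ m ≤ N := pvBn_ge N m hm (by omega)
    rw [if_pos, if_pos (hguard.2 hge)]
    rw [List.length_map, List.length_append, pvBytesLE_length, List.length_replicate]
    intro hcontra
    have : pvBn N + (m - pvBn N) = m := by exact_mod_cast hcontra
    omega

-- ===== VERDICT (by name: the statement is the Claim_ definition above) =====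
theorem switch_endian_spec : Claim_equal_switch_endian := by
  intro n bits _
  unfold Spec_switch_endian switch_endian switch_endian_alt
  by_cases h1 : n < 0 ∨ PySem.Int.mod bits 2 ≠ 0 ∨ bits < 8
  · rw [if_pos h1, if_pos h1]
  rw [if_neg h1, if_neg h1]
  push Not at h1
  obtain ⟨hn0, -, hb8⟩ := h1
  by_cases hpow : ∃ k : Nat, bits = (2 : Int) ^ k
  case neg =>
    rw [if_pos (fun h => hpow ((pvPowLoop_eq_iff bits hb8).1 h)),
      if_pos (fun h => hpow ((pvBitLen_eq_iff bits hb8).1 h))]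
  case pos =>
    rw [if_neg (not_ne_iff.2 ((pvPowLoop_eq_iff bits hb8).2 hpow)),
      if_neg (not_ne_iff.2 ((pvBitLen_eq_iff bits hb8).2 hpow))]
    obtain ⟨k, hk⟩ := hpow
    lift n to Nat using hn0 with N
    lift bits to Nat using (by omega : (0 : Int) ≤ bits) with b
    have hbk : b = 2 ^ k := by exact_mod_cast hk
    have hk3 : 3 ≤ k := by
      by_contra hlt
      have hb8' : 8 ≤ b := by exact_mod_cast hb8
      interval_cases k <;> omega
    rw [Int.toNat_natCast]
    exact pvTailEq N b k hbk hk3
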